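-- pv_equiv track=rewrite | github.com/Creariax5/Wiki-Scrap | other/fonc.py | remove_wiki
-- ===== SOURCE A (Python) =====
-- def remove_wiki(title):
--     j = 0
--     new_title = ""
--     for i in range(len(title)):
--         if j == 2:
--             new_title += title[i]
--         if title[i] == '/':
--             j += 1
--     return new_title
-- ===== SOURCE B (Python) =====
-- def remove_wiki(title):
--     parts = title.split('/', 2)
--     return parts[2] if len(parts) > 2 else ""
-- ===== Notes on version B (the rewrite author's own statement) =====
-- stated objective: simpler
-- what changed: Replaces the character-by-character slash-counting copy loop with a single bounded split on the slash character (maxsplit 2) plus an index into the resulting parts.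
-- intended difference: On titles containing at least three slashes with some character after the third slash, A returns only the text between the second slash and the third slash inclusive (its counter keeps incrementing past 2), while B returns the whole tail after the second slash, which is the intended everything-after-the-second-slash value. — e.g. on remove_wiki("a/b/c/d"): A returns "c/", B returns "c/d"
import Mathlib
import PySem

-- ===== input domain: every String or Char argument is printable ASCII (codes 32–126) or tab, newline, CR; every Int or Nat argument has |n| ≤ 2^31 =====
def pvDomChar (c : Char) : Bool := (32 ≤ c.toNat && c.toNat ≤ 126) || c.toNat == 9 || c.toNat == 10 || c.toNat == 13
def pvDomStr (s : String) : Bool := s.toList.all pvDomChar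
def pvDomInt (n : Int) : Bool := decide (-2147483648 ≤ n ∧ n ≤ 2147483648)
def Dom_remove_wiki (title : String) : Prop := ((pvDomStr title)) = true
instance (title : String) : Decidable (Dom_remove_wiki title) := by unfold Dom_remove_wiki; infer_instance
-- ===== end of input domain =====

-- B replaces A's slash-counting copy loop by one bounded split ('/', maxsplit 2) plus an index (objective: simpler).

-- ===== PORT A =====
def remove_wiki (title : String) : String :=
  ((title.toList).foldl
    (fun (st : Int × String) c =>
      let new_title := if st.1 == 2 then st.2.push c else st.2
      let j := if c == '/' then st.1 + 1 else st.1
      (j, new_title))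
    ((0 : Int), "")).2

-- ===== PORT B =====
def remove_wiki_alt (title : String) : String :=
  match PySem.Str.splitMax? title "/" 2 with
  | some parts => if h : 2 < parts.length then parts[2] else ""
  | none => ""   -- unreachable: the separator "/" is nonempty

-- ===== PRECONDITION & SPEC =====
-- On titles containing at least three slashes with some character after the third slash, A returns
-- only the text between the second slash and the third slash inclusive (its counter keeps
-- incrementing past 2), while B returns the whole tail after the second slash, which is the
-- intended everything-after-the-second-slash value.
def D_remove_wiki (title : String) : Prop :=
  4 ≤ title.toList.count '/' ∨
    (title.toList.count '/' = 3 ∧ title.toList.getLast? ≠ some '/')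
instance (title : String) : Decidable (D_remove_wiki title) := by unfold D_remove_wiki; infer_instance

def Spec_remove_wiki (title : String) (out : String) : Prop :=
  ¬ D_remove_wiki title → out = remove_wiki_alt title
instance (title : String) (out : String) : Decidable (Spec_remove_wiki title out) := by
  unfold Spec_remove_wiki; infer_instance

def pvDiffWitness_remove_wiki : String := "a/b/c/d"
def pvDiffWitnessOut_remove_wiki : String × String := ("c/", "c/d")

-- ===== CLAIM (what is proved, stated in full; the proofs are below) =====
def Claim_unchanged_remove_wiki : Prop :=
  ∀ (title : String), Dom_remove_wiki title → Spec_remove_wiki title (remove_wiki title)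
def Claim_changed_remove_wiki : Prop :=
  Dom_remove_wiki (pvDiffWitness_remove_wiki) ∧ D_remove_wiki (pvDiffWitness_remove_wiki) ∧
    remove_wiki (pvDiffWitness_remove_wiki) = pvDiffWitnessOut_remove_wiki.1 ∧
    remove_wiki_alt (pvDiffWitness_remove_wiki) = pvDiffWitnessOut_remove_wiki.2 ∧
    pvDiffWitnessOut_remove_wiki.1 ≠ pvDiffWitnessOut_remove_wiki.2
def Claim_exact_remove_wiki : Prop :=
  ∀ (title : String), Dom_remove_wiki title → D_remove_wiki title →
    remove_wiki title ≠ remove_wiki_alt title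

-- ===== LEMMAS AND PROOFS =====

-- the characters A's loop appends, starting from counter value j
def pvEmit : Int → List Char → List Char
  | _, [] => []
  | j, c :: cs => (if j == 2 then [c] else []) ++ pvEmit (if c == '/' then j + 1 else j) cs

theorem pvFold_eq (cs : List Char) : ∀ (j : Int) (s : String),
    ((cs.foldl
      (fun (st : Int × String) c =>
        let new_title := if st.1 == 2 then st.2.push c else st.2
        let j := if c == '/' then st.1 + 1 else st.1
        (j, new_title))
      (j, s)).2).toList = s.toList ++ pvEmit j cs := by
  induction cs with
  | nil => intro j s; simp [pvEmit]
  | cons c cs ih =>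
    intro j s
    simp only [List.foldl_cons, pvEmit]
    rw [ih]
    by_cases h : j == 2 <;> simp [h, String.toList_push]

theorem remove_wiki_toList (title : String) :
    (remove_wiki title).toList = pvEmit 0 title.toList := by
  unfold remove_wiki
  rw [pvFold_eq]
  simp

theorem pvEmit_ge3 (cs : List Char) : ∀ (j : Int), 3 ≤ j → pvEmit j cs = [] := by
  induction cs with
  | nil => intro j _; simp [pvEmit]
  | cons c cs ih =>
    intro j hj
    have h2 : (j == 2) = false := by simp; omega
    simp only [pvEmit, h2]
    by_cases h : c == '/' <;> simp [h] <;> exact ih _ (by omega)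

theorem pvEmit_two (cs : List Char) :
    pvEmit 2 cs = cs.takeWhile (· ≠ '/') ++
      (if cs.dropWhile (· ≠ '/') = [] then [] else ['/']) := by
  induction cs with
  | nil => simp [pvEmit]
  | cons c cs ih =>
    by_cases h : c = '/'
    · subst h
      simp [pvEmit, List.takeWhile_cons, List.dropWhile_cons, pvEmit_ge3 cs 3 le_rfl]
    · simp [pvEmit, List.takeWhile_cons, List.dropWhile_cons, h, ih]

theorem pvEmit_lt2 (cs : List Char) : ∀ (j : Int), 0 ≤ j → j < 2 →
    pvEmit j cs = (match cs.dropWhile (· ≠ '/') with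
      | [] => []
      | _ :: t => pvEmit (j + 1) t) := by
  induction cs with
  | nil => intro j _ _; simp [pvEmit]
  | cons c cs ih =>
    intro j h0 h2
    have hne : (j == 2) = false := by simp; omega
    by_cases h : c = '/'
    · subst h; simp [pvEmit, hne, List.dropWhile_cons]
    · have hc : (c == '/') = false := by simp [h]
      have hp : decide (c ≠ '/') = true := by simp [h]
      simp only [pvEmit, hne, hc, List.dropWhile_cons, hp, Bool.false_eq_true, if_false, if_true,
        List.nil_append]
      exact ih j h0 h2

-- the bounded split, characterised: go at fuel = length + 1
theorem pvGo_zero (fuel : Nat) (l cur : List Char) (acc : List (List Char)) :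
    PySem.Chars.splitOnMax.go ['/'] fuel 0 l cur acc = ((cur.reverse ++ l) :: acc).reverse := by
  cases fuel <;> cases l <;> simp [PySem.Chars.splitOnMax.go]

theorem pvGo_step (l : List Char) : ∀ (m : Nat) (cur : List Char) (acc : List (List Char)),
    PySem.Chars.splitOnMax.go ['/'] (l.length + 1) (m + 1) l cur acc =
      (match l.dropWhile (· ≠ '/') with
        | [] => ((cur.reverse ++ l) :: acc).reverse
        | _ :: t => PySem.Chars.splitOnMax.go ['/'] (t.length + 1) m t []
            ((cur.reverse ++ l.takeWhile (· ≠ '/')) :: acc)) := by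
  induction l with
  | nil => intro m cur acc; simp [PySem.Chars.splitOnMax.go]
  | cons c rest ih =>
    intro m cur acc
    by_cases h : c = '/'
    · subst h
      simp [PySem.Chars.splitOnMax.go, List.isPrefixOf, List.dropWhile_cons, List.takeWhile_cons]
    · have hc : ('/' == c) = false := by simp; exact fun e => h e.symm
      have hp : decide (c ≠ '/') = true := by simp [h]
      simp only [PySem.Chars.splitOnMax.go, List.length_cons]
      simp only [List.isPrefixOf, hc, List.dropWhile_cons, List.takeWhile_cons, hp,
        Bool.false_and, if_true]
      rw [if_neg (Nat.succ_ne_zero m), if_neg (by simp : ¬ (false = true)), ih]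
      cases hd : List.dropWhile (fun x => decide (x ≠ '/')) rest <;>
        simp [List.reverse_cons, List.append_assoc]

theorem pv_split3 (cs : List Char) :
    PySem.Chars.splitOnMax cs ['/'] 2 =
      (match cs.dropWhile (· ≠ '/') with
        | [] => [cs]
        | _ :: t1 =>
          match t1.dropWhile (· ≠ '/') with
          | [] => [cs.takeWhile (· ≠ '/'), t1]
          | _ :: t2 => [cs.takeWhile (· ≠ '/'), t1.takeWhile (· ≠ '/'), t2]) := by
  unfold PySem.Chars.splitOnMax
  rw [if_neg (by decide : ¬ ((2:Int) < 0)), (by decide : (2:Int).toNat = 1 + 1), pvGo_step]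
  simp only [ne_eq, decide_not]
  cases hd : List.dropWhile (fun x => !decide (x = '/')) cs with
  | nil => simp
  | cons d1 t1 =>
    simp only []
    rw [pvGo_step]
    simp only [ne_eq, decide_not]
    cases hd2 : List.dropWhile (fun x => !decide (x = '/')) t1 with
    | nil => simp
    | cons d2 t2 =>
      simp [pvGo_zero]

theorem remove_wiki_alt_toList (title : String) :
    (remove_wiki_alt title).toList =
      (match title.toList.dropWhile (· ≠ '/') with
        | [] => []
        | _ :: t1 =>
          match t1.dropWhile (· ≠ '/') with
          | [] => []
          | _ :: t2 => t2) := by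
  unfold remove_wiki_alt PySem.Str.splitMax? PySem.Chars.splitMax?
  have hsep : ("/" : String).toList = ['/'] := by decide
  rw [hsep, pv_split3]
  simp only [ne_eq, decide_not, List.isEmpty_cons]
  cases hd : List.dropWhile (fun x => !decide (x = '/')) title.toList with
  | nil => simp
  | cons d1 t1 =>
    cases hd2 : List.dropWhile (fun x => !decide (x = '/')) t1 with
    | nil => simp [hd2]
    | cons d2 t2 => simp [hd2]

theorem pvDropHead (l : List Char) (d : Char) (t : List Char)
    (h : List.dropWhile (fun x => !decide (x = '/')) l = d :: t) : d = '/' := by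
  have h2 := List.head_dropWhile_not (p := fun x => !decide (x = '/')) (l := l) (by simp [h])
  simp [h] at h2
  exact h2

theorem pvCountTake (l : List Char) :
    (List.takeWhile (fun x => !decide (x = '/')) l).count '/' = 0 := by
  rw [List.count_eq_zero]
  intro hm
  have h2 := List.mem_takeWhile_imp hm
  simp at h2

theorem pvDecompEq (l : List Char) (d : Char) (t : List Char)
    (h : List.dropWhile (fun x => !decide (x = '/')) l = d :: t) :
    l = List.takeWhile (fun x => !decide (x = '/')) l ++ d :: t := by
  conv_lhs => rw [← List.takeWhile_append_dropWhile (p := fun x => !decide (x = '/')) (l := l)]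
  rw [h]

theorem pvCountDecomp (l : List Char) (d : Char) (t : List Char)
    (h : List.dropWhile (fun x => !decide (x = '/')) l = d :: t) :
    l.count '/' = t.count '/' + 1 := by
  have hd := pvDropHead l d t h
  subst hd
  conv_lhs => rw [pvDecompEq l '/' t h]
  simp [List.count_append, pvCountTake, List.count_cons]

theorem pvLastCons (d : Char) (t : List Char) (h : t ≠ []) :
    (d :: t).getLast? = t.getLast? := by
  cases t with
  | nil => exact absurd rfl h
  | cons b l => rw [List.getLast?_cons_cons]

theorem pvLastAppendCons (p : List Char) (d : Char) (t : List Char) :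
    (p ++ d :: t).getLast? = (d :: t).getLast? := by
  rw [List.getLast?_append]
  cases h : (d :: t).getLast? with
  | none => exact absurd (List.getLast?_eq_none_iff.mp h) (by simp)
  | some x => simp [Option.some_or]

-- under two found slashes, A's character list is the tail cut at the next slash (inclusive)
theorem pvA_chars (title : String) (d1 d2 : Char) (t1 t2 : List Char)
    (hd : List.dropWhile (fun x => !decide (x = '/')) title.toList = d1 :: t1)
    (hd2 : List.dropWhile (fun x => !decide (x = '/')) t1 = d2 :: t2) :
    (remove_wiki title).toList =
      List.takeWhile (fun x => !decide (x = '/')) t2 ++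
        (if List.dropWhile (fun x => !decide (x = '/')) t2 = [] then [] else ['/']) := by
  rw [remove_wiki_toList, pvEmit_lt2 _ 0 (by norm_num) (by norm_num)]
  simp only [ne_eq, decide_not, hd]
  rw [pvEmit_lt2 _ (0+1) (by norm_num) (by norm_num)]
  simp only [ne_eq, decide_not, hd2]
  rw [(by norm_num : (0:Int)+1+1 = 2), pvEmit_two]
  simp only [ne_eq, decide_not]

theorem pvB_chars (title : String) (d1 d2 : Char) (t1 t2 : List Char)
    (hd : List.dropWhile (fun x => !decide (x = '/')) title.toList = d1 :: t1)
    (hd2 : List.dropWhile (fun x => !decide (x = '/')) t1 = d2 :: t2) :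
    (remove_wiki_alt title).toList = t2 := by
  rw [remove_wiki_alt_toList]
  simp only [ne_eq, decide_not, hd, hd2]

-- ===== VERDICT =====
theorem remove_wiki_spec : Claim_unchanged_remove_wiki := by
  unfold Claim_unchanged_remove_wiki
  intro title _hDom
  unfold Spec_remove_wiki
  intro hD
  apply String.toList_injective
  cases hd : List.dropWhile (fun x => !decide (x = '/')) title.toList with
  | nil =>
    rw [remove_wiki_toList, pvEmit_lt2 _ 0 (by norm_num) (by norm_num), remove_wiki_alt_toList]
    simp only [ne_eq, decide_not, hd]
  | cons d1 t1 =>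
    cases hd2 : List.dropWhile (fun x => !decide (x = '/')) t1 with
    | nil =>
      rw [remove_wiki_toList, pvEmit_lt2 _ 0 (by norm_num) (by norm_num), remove_wiki_alt_toList]
      simp only [ne_eq, decide_not, hd]
      rw [pvEmit_lt2 _ (0+1) (by norm_num) (by norm_num)]
      simp only [ne_eq, decide_not, hd2]
    | cons d2 t2 =>
      rw [pvA_chars title d1 d2 t1 t2 hd hd2, pvB_chars title d1 d2 t1 t2 hd hd2]
      have hcnt : title.toList.count '/' = t2.count '/' + 2 := by
        rw [pvCountDecomp _ _ _ hd, pvCountDecomp _ _ _ hd2]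
      unfold D_remove_wiki at hD
      push Not at hD
      cases h3 : List.dropWhile (fun x => !decide (x = '/')) t2 with
      | nil =>
        have hall := List.dropWhile_eq_nil_iff.mp h3
        have : List.takeWhile (fun x => !decide (x = '/')) t2 = t2 :=
          List.takeWhile_eq_self_iff.mpr hall
        simp [this]
      | cons d3 t3 =>
        have hd3 : d3 = '/' := pvDropHead _ _ _ h3
        subst hd3
        have hc2 : t2.count '/' = t3.count '/' + 1 := pvCountDecomp _ _ _ h3
        have hlast := hD.2 (by omega)
        have e1 := pvDecompEq _ _ _ hd
        have e2 := pvDecompEq _ _ _ hd2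
        have e3 := pvDecompEq _ _ _ h3
        have hlastc : title.toList.getLast? = ('/' :: t3).getLast? := by
          rw [e1, pvLastAppendCons, pvLastCons d1 t1 (by rw [e2]; simp),
            e2, pvLastAppendCons, pvLastCons d2 t2 (by rw [e3]; simp),
            e3, pvLastAppendCons]
        cases t3 with
        | nil =>
          simp only [reduceCtorEq, if_false]
          conv_rhs => rw [e3]
        | cons c4 t4 =>
          exfalso
          rw [pvLastCons '/' (c4 :: t4) (by simp), hlast] at hlastc
          have hmem : '/' ∈ c4 :: t4 := List.mem_of_getLast? hlastc.symm
          have hz : (c4 :: t4).count '/' = 0 := by omega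
          exact List.count_eq_zero.mp hz hmem

theorem remove_wiki_changed : Claim_changed_remove_wiki := by
  unfold Claim_changed_remove_wiki; decide

theorem remove_wiki_tight : Claim_exact_remove_wiki := by
  unfold Claim_exact_remove_wiki
  intro title _hDom hD heq
  have hge : 3 ≤ title.toList.count '/' := by
    unfold D_remove_wiki at hD
    rcases hD with h | ⟨h, _⟩ <;> omega
  cases hd : List.dropWhile (fun x => !decide (x = '/')) title.toList with
  | nil =>
    have hz : title.toList.count '/' = 0 := by
      have hall := List.dropWhile_eq_nil_iff.mp hd
      rw [List.count_eq_zero]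
      intro hm
      have := hall _ hm
      simp at this
    omega
  | cons d1 t1 =>
    have hc1 := pvCountDecomp _ _ _ hd
    cases hd2 : List.dropWhile (fun x => !decide (x = '/')) t1 with
    | nil =>
      have hz : t1.count '/' = 0 := by
        have hall := List.dropWhile_eq_nil_iff.mp hd2
        rw [List.count_eq_zero]
        intro hm
        have := hall _ hm
        simp at this
      omega
    | cons d2 t2 =>
      have hc2 := pvCountDecomp _ _ _ hd2
      have hA := pvA_chars title d1 d2 t1 t2 hd hd2
      have hB := pvB_chars title d1 d2 t1 t2 hd hd2
      rw [heq, hB] at hA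
      cases h3 : List.dropWhile (fun x => !decide (x = '/')) t2 with
      | nil =>
        have hz : t2.count '/' = 0 := by
          have hall := List.dropWhile_eq_nil_iff.mp h3
          rw [List.count_eq_zero]
          intro hm
          have := hall _ hm
          simp at this
        omega
      | cons d3 t3 =>
        have hd3 : d3 = '/' := pvDropHead _ _ _ h3
        subst hd3
        have hc3 := pvCountDecomp _ _ _ h3
        have e3 := pvDecompEq _ _ _ h3
        rw [h3] at hA
        simp only [reduceCtorEq, if_false] at hA
        have hlen1 : t2.length = (List.takeWhile (fun x => !decide (x = '/')) t2).length + 1 := by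
          conv_lhs => rw [hA]
          simp
        have hlen2 : t2.length =
            (List.takeWhile (fun x => !decide (x = '/')) t2).length + 1 + t3.length := by
          conv_lhs => rw [e3]
          simp
          omega
        have ht3 : t3 = [] := List.length_eq_zero_iff.mp (by omega)
        subst ht3
        have hcount : title.toList.count '/' = 3 := by
          simp at hc3
          omega
        have e1 := pvDecompEq _ _ _ hd
        have e2 := pvDecompEq _ _ _ hd2
        have hlastc : title.toList.getLast? = some '/' := by
          rw [e1, pvLastAppendCons, pvLastCons d1 t1 (by rw [e2]; simp),
            e2, pvLastAppendCons, pvLastCons d2 t2 (by rw [e3]; simp),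
            e3, pvLastAppendCons]
          rfl
        unfold D_remove_wiki at hD
        rcases hD with h | ⟨_, h⟩
        · omega
        · exact h hlastc
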